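-- pv_equiv track=rewrite | github.com/minghao2016/DirectMarketing_CMR | Ingestor.py | getHeaderIndex
-- ===== SOURCE A (Python) =====
-- def getHeaderIndex(headerDic,fieldsList):
--     """
--     Takes the header dictionary and finds each element in the column
--     headers from the fields list. It then updates the integer values
--     for each element to match what column it is
--     """
--     for header in headerDic:
--         #Loops through each item in the dictionary
--         count = 0
--         for field in fieldsList:
--             #Loops through each column header in the column header array
--             if field.upper() == header.upper():
--                 #If the current column header is the same as the header in
--                 #the header dictionary then save that index value
--                 headerDic[header] = count
--                 break
--             else:
--                 count = count + 1
--     return headerDic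
-- ===== SOURCE B (Python) =====
-- def getHeaderIndex(headerDic, fieldsList):
--     # Group the header keys by their uppercase form, then make ONE pass over the
--     # columns, assigning every still-pending header at its first matching column.
--     pending = {}
--     for k in headerDic:
--         pending.setdefault(k.upper(), []).append(k)
--     i = 0
--     for f in fieldsList:
--         keys = pending.pop(f.upper(), None)
--         if keys is not None:
--             for k in keys:
--                 headerDic[k] = i
--         i += 1
--     return headerDic
-- ===== Notes on version B (the rewrite author's own statement) =====
-- stated objective: faster
-- what changed: B inverts the loop nesting: it groups the header keys by their uppercase form once, then makes a single pass over the columns, popping the group matching each column and assigning that column index to its still-pending headers, instead of A's per-header linear rescan of fieldsList.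
import Mathlib
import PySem

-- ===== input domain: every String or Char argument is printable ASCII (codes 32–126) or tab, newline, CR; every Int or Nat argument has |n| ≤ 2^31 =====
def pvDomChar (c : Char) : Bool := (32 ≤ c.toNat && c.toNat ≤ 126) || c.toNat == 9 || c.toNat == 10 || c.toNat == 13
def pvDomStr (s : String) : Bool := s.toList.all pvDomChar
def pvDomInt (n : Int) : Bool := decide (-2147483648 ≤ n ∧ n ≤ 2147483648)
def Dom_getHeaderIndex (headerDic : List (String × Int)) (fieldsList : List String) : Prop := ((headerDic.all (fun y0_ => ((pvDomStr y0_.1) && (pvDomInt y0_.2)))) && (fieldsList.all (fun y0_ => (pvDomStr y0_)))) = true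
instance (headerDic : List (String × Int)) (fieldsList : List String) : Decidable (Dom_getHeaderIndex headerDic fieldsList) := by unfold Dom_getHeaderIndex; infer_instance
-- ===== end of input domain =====

-- B swaps the loop structure: instead of A's per-header rescan of fieldsList, it groups the
-- header keys by uppercase once and makes a single pass over the columns, assigning every
-- still-pending header at its first matching column (objective: faster). Both Pythons mutate
-- headerDic in place identically; the theorems are about the returned dictionary.

-- ===== PORT A =====
-- A's inner loop over fieldsList with break: first index whose field matches, none on fall-through.
def pvInnerA (header : String) : List String → Int → Option Int
  | [], _ => none
  | field :: rest, count =>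
    if PySem.Str.upper field = PySem.Str.upper header then some count
    else pvInnerA header rest (count + 1)

def getHeaderIndex (headerDic : List (String × Int)) (fieldsList : List String) : List (String × Int) :=
  let d0 := PySem.Dict.ofList headerDic
  (d0.keys.foldl
    (fun d header =>
      match pvInnerA header fieldsList 0 with
      | some count => d.insert header count
      | none => d)
    d0).items

-- ===== PORT B =====
-- first loop of Source B: pending.setdefault(k.upper(), []).append(k) over the header keys
def pvGroup (ks : List String) : PySem.Dict String (List String) :=
  (ks.map (fun k => (PySem.Str.upper k, k))).foldl
    (fun t p => t.modify p.1 [] (· ++ [p.2])) PySem.Dict.empty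

-- second loop of Source B: one pass over the columns, popping the matching group and
-- assigning the current index i to each of its header keys
def pvScan : List String → Int → PySem.Dict String (List String) → PySem.Dict String Int → PySem.Dict String Int
  | [], _, _, d => d
  | f :: rest, i, pending, d =>
    match pending.pop? (PySem.Str.upper f) with
    | some (ks, pending') => pvScan rest (i + 1) pending' (ks.foldl (fun d k => d.insert k i) d)
    | none => pvScan rest (i + 1) pending d

def getHeaderIndex_alt (headerDic : List (String × Int)) (fieldsList : List String) : List (String × Int) :=
  let d0 := PySem.Dict.ofList headerDic
  (pvScan fieldsList 0 (pvGroup d0.keys) d0).items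

-- ===== PRECONDITION & SPEC =====
def Spec_getHeaderIndex (headerDic : List (String × Int)) (fieldsList : List String) (out : List (String × Int)) : Prop := out = getHeaderIndex_alt headerDic fieldsList
instance (headerDic : List (String × Int)) (fieldsList : List String) (out : List (String × Int)) : Decidable (Spec_getHeaderIndex headerDic fieldsList out) := by unfold Spec_getHeaderIndex; infer_instance

-- ===== CLAIM (what is proved, stated in full; the proofs are below) =====
def Claim_equal_getHeaderIndex : Prop := ∀ (headerDic : List (String × Int)) (fieldsList : List String), Dom_getHeaderIndex headerDic fieldsList → Spec_getHeaderIndex headerDic fieldsList (getHeaderIndex headerDic fieldsList)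

-- ===== LEMMAS AND PROOFS =====

-- abstract "first matching index" search shared by the two characterisations
def pvFind (u : String) : List String → Int → Option Int
  | [], _ => none
  | f :: rest, i =>
    if PySem.Str.upper f = u then some i else pvFind u rest (i + 1)

theorem pvInnerA_eq_find (header : String) (fl : List String) (c : Int) :
    pvInnerA header fl c = pvFind (PySem.Str.upper header) fl c := by
  induction fl generalizing c with
  | nil => rfl
  | cons f rest ih => simp [pvInnerA, pvFind, ih]

-- erase facts (PySem.Dict.erase is items.filter)
theorem pv_get?_erase_self (d : PySem.Dict String (List String)) (u : String) :
    (d.erase u).get? u = none := by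
  obtain ⟨l⟩ := d
  simp only [PySem.Dict.erase, PySem.Dict.get?]
  rw [List.find?_eq_none.mpr]
  · rfl
  · intro p hp
    have := (List.mem_filter.mp hp).2
    simpa using this

theorem pv_get?_erase_of_ne (d : PySem.Dict String (List String)) (u k : String) (h : k ≠ u) :
    (d.erase u).get? k = d.get? k := by
  obtain ⟨l⟩ := d
  induction l with
  | nil => rfl
  | cons p rest ih =>
    show (PySem.Dict.mk ((p :: rest).filter (fun q => !q.1 == u))).get? k
        = (PySem.Dict.mk (p :: rest)).get? k
    rw [List.filter_cons, PySem.Dict.get?_mk_cons]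
    by_cases h1 : p.1 = u
    · rw [if_neg (by simp [h1])]
      have h2 : (p.1 == k) = false := by
        simp only [beq_eq_false_iff_ne, ne_eq, h1]
        exact fun hh => h hh.symm
      rw [h2]
      exact ih
    · rw [if_pos (by simp [h1]), PySem.Dict.get?_mk_cons]
      by_cases h2 : p.1 = k
      · simp [h2]
      · rw [show (p.1 == k) = false by simp [h2]]
        exact ih

-- getD / keys of the inner assignment fold of B ("for k in keys: headerDic[k] = i")
theorem pv_foldB_getD (ks : List String) (i : Int) :
    ∀ (d : PySem.Dict String Int) (x : String),
      (ks.foldl (fun d k => d.insert k i) d).getD x 0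
        = if x ∈ ks then i else d.getD x 0 := by
  induction ks with
  | nil => intro d x; simp
  | cons a ks ih =>
    intro d x
    by_cases h : x ∈ ks
    · simp [List.foldl, ih, h]
    · by_cases hx : x = a
      · subst hx; simp [List.foldl, ih, h, PySem.Dict.getD_insert_self]
      · simp [List.foldl, ih, h, hx, PySem.Dict.getD_insert_of_ne _ _ _ hx]

theorem pv_foldB_keys (ks : List String) (i : Int) :
    ∀ (d : PySem.Dict String Int), (∀ x ∈ ks, d.contains x = true) →
      (ks.foldl (fun d k => d.insert k i) d).keys = d.keys := by
  induction ks with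
  | nil => intro d _; rfl
  | cons a ks ih =>
    intro d h
    have ha : d.contains a = true := h a (by simp)
    have hrest : ∀ x ∈ ks, (d.insert a i).contains x = true := by
      intro x hx
      rw [PySem.Dict.contains_insert]
      simp [h x (List.mem_cons_of_mem _ hx)]
    simp only [List.foldl, ih _ hrest, PySem.Dict.keys_insert_of_contains _ _ ha]

-- getD / keys of A's outer fold over the header keys
theorem pv_foldA_getD (fl : List String) (ks : List String) :
    ∀ (d : PySem.Dict String Int) (x : String),
      (ks.foldl (fun d h => match pvInnerA h fl 0 with
                            | some c => d.insert h c
                            | none => d) d).getD x 0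
        = if x ∈ ks then
            (match pvFind (PySem.Str.upper x) fl 0 with
             | some c => c
             | none => d.getD x 0)
          else d.getD x 0 := by
  induction ks with
  | nil => intro d x; simp
  | cons a ks ih =>
    intro d x
    by_cases hx : x = a
    · subst hx
      have hstep : (match pvInnerA x fl 0 with
          | some c => d.insert x c
          | none => d).getD x 0
          = (match pvFind (PySem.Str.upper x) fl 0 with
             | some c => c
             | none => d.getD x 0) := by
        rw [pvInnerA_eq_find]
        cases pvFind (PySem.Str.upper x) fl 0 with
        | none => rfl
        | some c => simp [PySem.Dict.getD_insert_self]
      by_cases h : x ∈ ks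
      · simp only [List.foldl, ih, h, if_true, hstep, List.mem_cons, true_or]
        cases pvFind (PySem.Str.upper x) fl 0 <;> simp
      · simp [List.foldl, ih, h, hstep]
    · have hstep : (match pvInnerA a fl 0 with
          | some c => d.insert a c
          | none => d).getD x 0 = d.getD x 0 := by
        cases pvInnerA a fl 0 with
        | none => rfl
        | some c => simp [PySem.Dict.getD_insert_of_ne _ _ _ hx]
      by_cases h : x ∈ ks <;>
        simp [List.foldl, ih, h, hstep, hx]

theorem pv_foldA_keys (fl : List String) (ks : List String) :
    ∀ (d : PySem.Dict String Int), (∀ x ∈ ks, d.contains x = true) →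
      (ks.foldl (fun d h => match pvInnerA h fl 0 with
                            | some c => d.insert h c
                            | none => d) d).keys = d.keys := by
  induction ks with
  | nil => intro d _; rfl
  | cons a ks ih =>
    intro d h
    have ha : d.contains a = true := h a (by simp)
    have hrest : ∀ (d' : PySem.Dict String Int), d'.keys = d.keys →
        ∀ x ∈ ks, d'.contains x = true := by
      intro d' hk x hx
      rw [PySem.Dict.contains_iff_mem_keys] at *
      rw [hk]
      exact (PySem.Dict.contains_iff_mem_keys _ _).mp (h x (List.mem_cons_of_mem _ hx))
    cases hA : pvInnerA a fl 0 with
    | none => simp only [List.foldl, hA]; exact ih d (fun x hx => h x (List.mem_cons_of_mem _ hx))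
    | some c =>
      have hkeys : (d.insert a c).keys = d.keys := PySem.Dict.keys_insert_of_contains _ _ ha
      simp only [List.foldl, hA]
      rw [ih _ (hrest _ hkeys), hkeys]

-- the groups built by pvGroup are the uppercase fibres of ks
theorem pv_group_getD (ks : List String) (u : String) :
    (pvGroup ks).getD u [] = ks.filter (fun k => PySem.Str.upper k == u) := by
  unfold pvGroup
  rw [PySem.Dict.getD_foldl_modify_append]
  simp only [PySem.Dict.getD_empty, List.nil_append, List.filter_map, List.map_map]
  simp [Function.comp_def]

theorem pv_group_wf (ks : List String) (u : String) (l : List String)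
    (h : (pvGroup ks).get? u = some l) : ∀ x ∈ l, PySem.Str.upper x = u ∧ x ∈ ks := by
  intro x hx
  have : l = (pvGroup ks).getD u [] := by simp [PySem.Dict.getD, h]
  rw [this, pv_group_getD] at hx
  have := List.of_mem_filter hx
  exact ⟨by simpa using this, List.mem_of_mem_filter hx⟩

-- main invariant of B's single pass: what each key's final value is
theorem pv_scan_getD (x : String) :
    ∀ (fl : List String) (i : Int) (pending : PySem.Dict String (List String))
      (d : PySem.Dict String Int),
      (∀ u l, pending.get? u = some l → ∀ y ∈ l, PySem.Str.upper y = u) →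
      (pvScan fl i pending d).getD x 0
        = if x ∈ pending.getD (PySem.Str.upper x) [] then
            (match pvFind (PySem.Str.upper x) fl i with
             | some j => j
             | none => d.getD x 0)
          else d.getD x 0 := by
  intro fl
  induction fl with
  | nil =>
    intro i pending d _
    simp only [pvScan, pvFind]
    split <;> rfl
  | cons f rest ih =>
    intro i pending d hwf
    by_cases hm : x ∈ pending.getD (PySem.Str.upper x) []
    · -- x still pending: its group exists and contains it
      obtain ⟨lx, hlx⟩ : ∃ lx, pending.get? (PySem.Str.upper x) = some lx := by
        cases hg : pending.get? (PySem.Str.upper x) with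
        | none => rw [PySem.Dict.getD, hg] at hm; simp at hm
        | some lx => exact ⟨lx, rfl⟩
      have hmx : x ∈ lx := by rw [PySem.Dict.getD, hlx] at hm; simpa using hm
      by_cases hf : PySem.Str.upper f = PySem.Str.upper x
      · -- the column matches x's group: it is popped and x gets index i
        simp only [pvScan, PySem.Dict.pop?, hf, hlx, Option.map_some]
        have hwf' : ∀ u l, (pending.erase (PySem.Str.upper x)).get? u = some l →
            ∀ y ∈ l, PySem.Str.upper y = u := by
          intro u l hl
          by_cases hu : u = PySem.Str.upper x
          · rw [hu, pv_get?_erase_self] at hl; exact absurd hl (by simp)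
          · exact hwf u l (by rwa [pv_get?_erase_of_ne _ _ _ hu] at hl)
        rw [ih (i + 1) _ _ hwf']
        have hnone : (pending.erase (PySem.Str.upper x)).getD (PySem.Str.upper x) [] = [] := by
          rw [PySem.Dict.getD, pv_get?_erase_self]; rfl
        rw [hnone]
        simp only [List.not_mem_nil, if_false, pv_foldB_getD, hmx, if_true, hm]
        simp [pvFind, hf]
      · -- a different group (or none) is popped: x is untouched this step
        have hflx : pvFind (PySem.Str.upper x) (f :: rest) i
            = pvFind (PySem.Str.upper x) rest (i + 1) := by
          simp [pvFind, hf]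
        cases hpop : pending.get? (PySem.Str.upper f) with
        | none =>
          simp only [pvScan, PySem.Dict.pop?, hpop, Option.map_none]
          rw [ih (i + 1) _ _ hwf, hflx]
        | some ks =>
          simp only [pvScan, PySem.Dict.pop?, hpop, Option.map_some]
          have hwf' : ∀ u l, (pending.erase (PySem.Str.upper f)).get? u = some l →
              ∀ y ∈ l, PySem.Str.upper y = u := by
            intro u l hl
            by_cases hu : u = PySem.Str.upper f
            · rw [hu, pv_get?_erase_self] at hl; exact absurd hl (by simp)
            · exact hwf u l (by rwa [pv_get?_erase_of_ne _ _ _ hu] at hl)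
          rw [ih (i + 1) _ _ hwf']
          have hxks : x ∉ ks := fun hxk => hf ((hwf _ _ hpop x hxk).symm)
          have hsame : (pending.erase (PySem.Str.upper f)).getD (PySem.Str.upper x) []
              = pending.getD (PySem.Str.upper x) [] := by
            rw [PySem.Dict.getD, pv_get?_erase_of_ne _ _ _ (fun he => hf he.symm),
                ← PySem.Dict.getD]
          rw [hsame]
          simp only [hm, if_true, pv_foldB_getD, hxks, if_false, hflx]
    · -- x not pending: nothing ever assigns it
      cases hpop : pending.get? (PySem.Str.upper f) with
      | none =>
        simp only [pvScan, PySem.Dict.pop?, hpop, Option.map_none]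
        rw [ih (i + 1) _ _ hwf]
        simp [hm]
      | some ks =>
        simp only [pvScan, PySem.Dict.pop?, hpop, Option.map_some]
        have hwf' : ∀ u l, (pending.erase (PySem.Str.upper f)).get? u = some l →
            ∀ y ∈ l, PySem.Str.upper y = u := by
          intro u l hl
          by_cases hu : u = PySem.Str.upper f
          · rw [hu, pv_get?_erase_self] at hl; exact absurd hl (by simp)
          · exact hwf u l (by rwa [pv_get?_erase_of_ne _ _ _ hu] at hl)
        rw [ih (i + 1) _ _ hwf']
        have hxks : x ∉ ks := by
          intro hxk
          have hu : PySem.Str.upper x = PySem.Str.upper f := hwf _ _ hpop x hxk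
          rw [PySem.Dict.getD, hu, hpop] at hm
          exact hm (by simpa using hxk)
        have hmono : x ∈ (pending.erase (PySem.Str.upper f)).getD (PySem.Str.upper x) [] →
            x ∈ pending.getD (PySem.Str.upper x) [] := by
          intro hx'
          by_cases hu : PySem.Str.upper x = PySem.Str.upper f
          · rw [PySem.Dict.getD, hu, pv_get?_erase_self] at hx'; simp at hx'
          · rwa [PySem.Dict.getD, pv_get?_erase_of_ne _ _ _ hu, ← PySem.Dict.getD] at hx'
        have hnm : x ∉ (pending.erase (PySem.Str.upper f)).getD (PySem.Str.upper x) [] :=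
          fun hx' => hm (hmono hx')
        simp only [hnm, if_false, pv_foldB_getD, hxks, if_false, hm]

-- B's pass never adds a key to the result dictionary
theorem pv_scan_keys :
    ∀ (fl : List String) (i : Int) (pending : PySem.Dict String (List String))
      (d : PySem.Dict String Int),
      (∀ u l, pending.get? u = some l → ∀ y ∈ l, d.contains y = true) →
      (pvScan fl i pending d).keys = d.keys := by
  intro fl
  induction fl with
  | nil => intro i pending d _; rfl
  | cons f rest ih =>
    intro i pending d hsub
    cases hpop : pending.get? (PySem.Str.upper f) with
    | none =>
      simp only [pvScan, PySem.Dict.pop?, hpop, Option.map_none]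
      exact ih (i + 1) _ _ hsub
    | some ks =>
      simp only [pvScan, PySem.Dict.pop?, hpop, Option.map_some]
      have hks : ∀ y ∈ ks, d.contains y = true := hsub _ _ hpop
      have hkeys : (ks.foldl (fun d k => d.insert k i) d).keys = d.keys :=
        pv_foldB_keys ks i d hks
      have hsub' : ∀ u l, (pending.erase (PySem.Str.upper f)).get? u = some l →
          ∀ y ∈ l, (ks.foldl (fun d k => d.insert k i) d).contains y = true := by
        intro u l hl y hy
        rw [PySem.Dict.contains_iff_mem_keys, hkeys, ← PySem.Dict.contains_iff_mem_keys]
        by_cases hu : u = PySem.Str.upper f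
        · rw [hu, pv_get?_erase_self] at hl; exact absurd hl (by simp)
        · exact hsub u l (by rwa [pv_get?_erase_of_ne _ _ _ hu] at hl) y hy
      rw [ih (i + 1) _ _ hsub', hkeys]

theorem getHeaderIndex_eq (headerDic : List (String × Int)) (fieldsList : List String) :
    getHeaderIndex headerDic fieldsList = getHeaderIndex_alt headerDic fieldsList := by
  unfold getHeaderIndex getHeaderIndex_alt
  set d0 := PySem.Dict.ofList headerDic with hd0
  have hnd : d0.keys.Nodup := PySem.Dict.nodup_keys_ofList headerDic
  have hcont : ∀ x ∈ d0.keys, d0.contains x = true :=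
    fun x hx => (PySem.Dict.contains_iff_mem_keys _ _).mpr hx
  have hwf : ∀ u l, (pvGroup d0.keys).get? u = some l → ∀ y ∈ l, PySem.Str.upper y = u :=
    fun u l h y hy => (pv_group_wf _ _ _ h y hy).1
  have hsub : ∀ u l, (pvGroup d0.keys).get? u = some l → ∀ y ∈ l, d0.contains y = true :=
    fun u l h y hy => hcont y (pv_group_wf _ _ _ h y hy).2
  set resA := d0.keys.foldl
    (fun d header => match pvInnerA header fieldsList 0 with
                     | some count => d.insert header count
                     | none => d) d0 with hresA
  set resB := pvScan fieldsList 0 (pvGroup d0.keys) d0 with hresB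
  have hkA : resA.keys = d0.keys := pv_foldA_keys fieldsList d0.keys d0 hcont
  have hkB : resB.keys = d0.keys := pv_scan_keys fieldsList 0 _ d0 hsub
  rw [PySem.Dict.items_eq_map_keys resA (hkA ▸ hnd) 0,
      PySem.Dict.items_eq_map_keys resB (hkB ▸ hnd) 0, hkA, hkB]
  refine List.map_congr_left (fun k hk => ?_)
  have hA : resA.getD k 0
      = (match pvFind (PySem.Str.upper k) fieldsList 0 with
         | some c => c
         | none => d0.getD k 0) := by
    rw [hresA, pv_foldA_getD]
    simp [hk]
  have hmem : k ∈ (pvGroup d0.keys).getD (PySem.Str.upper k) [] := by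
    rw [pv_group_getD]
    exact List.mem_filter.mpr ⟨hk, by simp⟩
  have hB : resB.getD k 0
      = (match pvFind (PySem.Str.upper k) fieldsList 0 with
         | some c => c
         | none => d0.getD k 0) := by
    rw [hresB, pv_scan_getD k fieldsList 0 _ d0 hwf]
    simp [hmem]
  rw [hA, hB]

-- ===== VERDICT (by name: the statement is the Claim_ definition above) =====
theorem getHeaderIndex_spec : Claim_equal_getHeaderIndex := by
  intro headerDic fieldsList _
  unfold Spec_getHeaderIndex
  exact getHeaderIndex_eq headerDic fieldsList
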